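-- pv_equiv track=rewrite | github.com/CV4MACRO/TextCVTool | TextExtraction.py | _process_raw_text_to_sequence
-- ===== SOURCE A (Python) =====
-- def _process_raw_text_to_sequence(OCR_text):
--     candidate_sequences = [] # Store all sequence
--     candidate_indexes = []
--     sequence = [] # Stack a chunck of non-separated word
--     indexes = []
--     for i, word in enumerate(OCR_text):
--             if not(word.isspace() or len(word) == 0 or word=="|"):
--                 sequence.append(word)
--                 indexes.append(i)
--             elif len(sequence) != 0: # If space : new sequence
--                 if sequence not in candidate_sequences:
--                     indexes.append(i)
--                     candidate_indexes.append(indexes)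
--                     candidate_sequences.append(sequence)
--                 sequence=[]
--                 indexes=[]
--             if i == len(OCR_text)-1 and len(sequence)!=0: # Add last sequence
--                 if sequence not in candidate_sequences:
--                     candidate_sequences.append(sequence)
--                     indexes.append(i+1)
--                     candidate_indexes.append(indexes)
--
--     return candidate_sequences, candidate_indexes
-- ===== SOURCE B (Python) =====
-- def _process_raw_text_to_sequence(OCR_text):
--     def is_sep(w):
--         return w.isspace() or len(w) == 0 or w == "|"
--     seqs, idxs = [], []
--     seen = set()
--     n = len(OCR_text)
--     i = 0
--     while i < n:
--         if is_sep(OCR_text[i]):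
--             i += 1
--             continue
--         j = i
--         while j < n and not is_sep(OCR_text[j]):
--             j += 1
--         words = OCR_text[i:j]
--         key = tuple(words)
--         if key not in seen:
--             seen.add(key)
--             seqs.append(words)
--             idxs.append(list(range(i, j)) + [j])
--         i = j
--     return seqs, idxs
-- ===== Notes on version B (the rewrite author's own statement) =====
-- stated objective: alternative
-- what changed: A's element-at-a-time fold that threads a partial-sequence/indexes state and a special end-of-list branch is replaced by a two-pointer run-at-a-time scan (takeWhile/dropWhile split per run) with a set for the duplicate test instead of a list membership scan.
import Mathlib
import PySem

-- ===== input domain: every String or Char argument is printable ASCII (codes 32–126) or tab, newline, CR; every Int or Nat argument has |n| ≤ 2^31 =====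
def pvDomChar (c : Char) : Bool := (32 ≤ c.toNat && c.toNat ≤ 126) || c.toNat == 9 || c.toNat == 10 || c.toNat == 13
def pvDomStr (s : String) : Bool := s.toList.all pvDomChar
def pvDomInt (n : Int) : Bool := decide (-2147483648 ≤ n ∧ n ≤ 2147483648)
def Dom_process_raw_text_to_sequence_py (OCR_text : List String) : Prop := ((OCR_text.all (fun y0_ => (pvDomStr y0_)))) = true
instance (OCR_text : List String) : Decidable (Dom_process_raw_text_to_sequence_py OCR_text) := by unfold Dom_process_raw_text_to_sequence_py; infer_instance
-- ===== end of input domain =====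

-- B replaces A's element-at-a-time state machine (partial sequence + end-of-list special case
-- carried through one fold) by a run-at-a-time two-pointer scan with a set for the duplicate
-- test; objective: alternative decomposition (not measured faster).

-- ===== PORT A =====
-- word.isspace() or len(word) == 0 or word == "|"
def pvIsSepA (w : String) : Bool :=
  PySem.Str.strIsspace w || PySem.Str.len w == 0 || w == "|"

-- loop body of A's 'for i, word in enumerate(OCR_text)'; state = (candidate_sequences, candidate_indexes, sequence, indexes)
def pvAStep (n : Int)
    (st : List (List String) × List (List Int) × List String × List Int)
    (p : Int × String) :
    List (List String) × List (List Int) × List String × List Int :=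
  let cs := st.1; let ci := st.2.1; let seq := st.2.2.1; let idxs := st.2.2.2
  let i := p.1; let w := p.2
  let st' :=
    if !(pvIsSepA w) then (cs, ci, seq ++ [w], idxs ++ [i])
    else if seq ≠ [] then
      if !(cs.contains seq) then (cs ++ [seq], ci ++ [idxs ++ [i]], ([] : List String), ([] : List Int))
      else (cs, ci, ([] : List String), ([] : List Int))
    else (cs, ci, seq, idxs)
  if i == n - 1 ∧ st'.2.2.1 ≠ [] then
    if !(st'.1.contains st'.2.2.1) then
      (st'.1 ++ [st'.2.2.1], st'.2.1 ++ [st'.2.2.2 ++ [i + 1]], st'.2.2.1, st'.2.2.2 ++ [i + 1])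
    else st'
  else st'

def process_raw_text_to_sequence_py (OCR_text : List String) : List (List String) × List (List Int) :=
  let n : Int := PySem.List.len OCR_text
  let st := (PySem.List.enumerate OCR_text 0).foldl (pvAStep n) ([], [], [], [])
  (st.1, st.2.1)

-- ===== PORT B =====
def pvIsSepB (w : String) : Bool :=
  PySem.Str.strIsspace w || PySem.Str.len w == 0 || w == "|"

-- B's outer while-loop, recursing on the unprocessed suffix (i = its absolute start index);
-- the inner 'while j < n and not is_sep' + slice OCR_text[i:j] is the takeWhile/dropWhile split.
def pvBLoop (rem : List String) (i : Int) (seen : PySem.Set (List String))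
    (seqs : List (List String)) (idxs : List (List Int)) :
    List (List String) × List (List Int) :=
  match rem with
  | [] => (seqs, idxs)
  | w :: rest =>
    if pvIsSepB w then pvBLoop rest (i + 1) seen seqs idxs
    else
      let words := (w :: rest).takeWhile (fun v => !pvIsSepB v)
      let j := i + words.length
      let rem' := (w :: rest).dropWhile (fun v => !pvIsSepB v)
      if PySem.Set.contains seen words then pvBLoop rem' j seen seqs idxs
      else pvBLoop rem' j (PySem.Set.add seen words)
             (seqs ++ [words]) (idxs ++ [PySem.List.pyRange i j 1 ++ [j]])
  termination_by rem.length
  decreasing_by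
    · simp
    · simp only [List.dropWhile]
      have h1 : (!pvIsSepB w) = true := by simp_all
      rw [h1]
      exact Nat.lt_succ_of_le (List.length_dropWhile_le _ _)
    · simp only [List.dropWhile]
      have h1 : (!pvIsSepB w) = true := by simp_all
      rw [h1]
      exact Nat.lt_succ_of_le (List.length_dropWhile_le _ _)

def process_raw_text_to_sequence_py_alt (OCR_text : List String) : List (List String) × List (List Int) :=
  pvBLoop OCR_text 0 PySem.Set.empty [] []

-- ===== PRECONDITION & SPEC =====
def Spec_process_raw_text_to_sequence_py (OCR_text : List String) (out : List (List String) × List (List Int)) : Prop := out = process_raw_text_to_sequence_py_alt OCR_text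
instance (OCR_text : List String) (out : List (List String) × List (List Int)) : Decidable (Spec_process_raw_text_to_sequence_py OCR_text out) := by unfold Spec_process_raw_text_to_sequence_py; infer_instance

-- ===== CLAIM (what is proved, stated in full; the proofs are below) =====
def Claim_equal_process_raw_text_to_sequence_py : Prop := ∀ (OCR_text : List String), Dom_process_raw_text_to_sequence_py OCR_text → Spec_process_raw_text_to_sequence_py OCR_text (process_raw_text_to_sequence_py OCR_text)

-- ===== LEMMAS AND PROOFS =====

theorem pv_dropWhile_head (p : String → Bool) (l : List String) (s : String) (t : List String)
    (h : l.dropWhile p = s :: t) : p s = false := by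
  induction l with
  | nil => simp [List.dropWhile] at h
  | cons a l ih =>
    rw [List.dropWhile_cons] at h
    by_cases hp : p a = true
    · rw [if_pos hp] at h; exact ih h
    · rw [if_neg hp] at h; cases h; simpa using hp

theorem pv_sepAB (w : String) : pvIsSepB w = pvIsSepA w := rfl

-- folding A's step over a run of non-separator words none of which sits at index n-1
theorem pv_run (n : Int) (ws : List String) (i : Int)
    (cs : List (List String)) (ci : List (List Int)) (seq : List String) (idxs : List Int)
    (hsep : ∀ v ∈ ws, pvIsSepA v = false) (hlt : i + ws.length ≤ n - 1) :
    (PySem.List.enumerate ws i).foldl (pvAStep n) (cs, ci, seq, idxs)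
      = (cs, ci, seq ++ ws, idxs ++ PySem.List.pyRange i (i + ws.length) 1) := by
  induction ws generalizing i seq idxs with
  | nil => simp [PySem.List.enumerate_nil, PySem.List.pyRange_one_eq_nil]
  | cons v vs ih =>
    have hv : pvIsSepA v = false := hsep v (by simp)
    have hi : ¬ ((i == n - 1) = true) := by
      simp only [List.length_cons] at hlt
      simp only [beq_iff_eq]; omega
    rw [PySem.List.enumerate_cons, List.foldl_cons]
    have hstep : pvAStep n (cs, ci, seq, idxs) (i, v) = (cs, ci, seq ++ [v], idxs ++ [i]) := by
      simp [pvAStep, hv, hi]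
    rw [hstep, ih (i+1) (seq ++ [v]) (idxs ++ [i]) (fun u hu => hsep u (List.mem_cons_of_mem _ hu)) (by simp at hlt ⊢; omega)]
    have e : i + ((v :: vs).length : Int) = i + 1 + (vs.length : Int) := by simp only [List.length_cons]; push_cast; ring
    rw [e, PySem.List.pyRange_one_cons (a := i) (b := i + 1 + (vs.length : Int)) (by omega)]
    simp only [List.append_assoc, List.cons_append, List.nil_append]

theorem pv_main (n : Int) (rem : List String) (i : Int) (seen : PySem.Set (List String))
    (cs : List (List String)) (ci : List (List Int))
    (hn : n = i + rem.length)
    (hseen : ∀ t, PySem.Set.contains seen t = cs.contains t) :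
    (((PySem.List.enumerate rem i).foldl (pvAStep n) (cs, ci, [], [])).1,
     ((PySem.List.enumerate rem i).foldl (pvAStep n) (cs, ci, [], [])).2.1)
      = pvBLoop rem i seen cs ci := by
  match rem with
  | [] => simp [PySem.List.enumerate_nil, pvBLoop]
  | w :: rest =>
    by_cases hw : pvIsSepA w = true
    · -- separator: state unchanged, recurse
      have hstep : pvAStep n (cs, ci, [], []) (i, w) = (cs, ci, [], []) := by
        simp [pvAStep, hw]
      rw [PySem.List.enumerate_cons, List.foldl_cons, hstep]
      rw [pv_main n rest (i+1) seen cs ci (by simp only [List.length_cons] at hn; push_cast at hn ⊢; omega) hseen]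
      rw [pvBLoop]; simp [pv_sepAB, hw]
    · -- non-separator: a whole run
      have hw' : pvIsSepA w = false := by simpa using hw
      set p : String → Bool := fun v => !pvIsSepB v with hp
      have hpw : p w = true := by simp [hp, pv_sepAB, hw']
      set words : List String := (w :: rest).takeWhile p with hwords
      set rem' : List String := (w :: rest).dropWhile p with hrem'
      have hsplit : words ++ rem' = w :: rest := List.takeWhile_append_dropWhile
      have hwordsep : ∀ v ∈ words, pvIsSepA v = false := by
        intro v hv
        have := List.mem_takeWhile_imp hv
        simpa [hp, pv_sepAB] using this
      have hwne : words ≠ [] := by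
        rw [hwords, List.takeWhile_cons, hpw]; simp
      have hlen : words.length + rem'.length = rest.length + 1 := by
        simpa using congrArg List.length hsplit
      have hwB : pvIsSepB w = false := by rw [pv_sepAB]; exact hw'
      cases hrm : rem' with
      | nil =>
        have hww : words = w :: rest := by rw [← hsplit, hrm, List.append_nil]
        obtain ⟨ws0, wl, hws⟩ : ∃ ws0 wl, words = ws0 ++ [wl] := by
          rcases List.eq_nil_or_concat words with h | ⟨L, b, h⟩
          · exact absurd h hwne
          · exact ⟨L, b, by simpa [List.concat_eq_append] using h⟩
        have hnn : n = i + words.length := by rw [hn, hww]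
        have hlw : words.length = ws0.length + 1 := by rw [hws]; simp
        have henum : PySem.List.enumerate (w :: rest) i
            = PySem.List.enumerate ws0 i ++ [((i + (ws0.length : Int)), wl)] := by
          rw [← hww, hws, PySem.List.enumerate_append]
          simp [PySem.List.enumerate_cons, PySem.List.enumerate_nil]
        rw [henum, List.foldl_append]
        rw [pv_run n ws0 i cs ci [] []
            (fun u hu => hwordsep u (by rw [hws]; exact List.mem_append_left _ hu))
            (by push_cast [hlw] at hnn ⊢; omega)]
        simp only [List.nil_append, List.foldl_cons, List.foldl_nil]
        have hwl : pvIsSepA wl = false :=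
          hwordsep wl (by rw [hws]; exact List.mem_append_right _ (by simp))
        have hieq : ((i + (ws0.length : Int)) == n - 1) = true := by
          push_cast [hlw] at hnn ⊢; simp only [beq_iff_eq]; omega
        rw [pvBLoop]
        simp only [hwB, Bool.false_eq_true, if_false]
        rw [← hp, ← hwords, ← hrem', hrm, hseen words]
        by_cases hdup : cs.contains words = true
        · have hdup2 : cs.contains (ws0 ++ [wl]) = true := by rw [← hws]; exact hdup
          have hstep : pvAStep n (cs, ci, ws0, PySem.List.pyRange i (i + (ws0.length : Int)) 1)
              ((i + (ws0.length : Int)), wl)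
              = (cs, ci, ws0 ++ [wl],
                 PySem.List.pyRange i (i + (ws0.length : Int)) 1 ++ [(i + (ws0.length : Int))]) := by
            simp [pvAStep, hwl, hieq, show (ws0 ++ [wl]) ∈ cs by simpa using hdup2]
          rw [hstep, if_pos hdup, pvBLoop]
        · simp only [Bool.not_eq_true] at hdup
          have hdup2 : cs.contains (ws0 ++ [wl]) = false := by rw [← hws]; exact hdup
          have hstep : pvAStep n (cs, ci, ws0, PySem.List.pyRange i (i + (ws0.length : Int)) 1)
              ((i + (ws0.length : Int)), wl)
              = (cs ++ [ws0 ++ [wl]],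
                 ci ++ [PySem.List.pyRange i (i + (ws0.length : Int)) 1
                        ++ [(i + (ws0.length : Int))] ++ [(i + (ws0.length : Int)) + 1]],
                 ws0 ++ [wl],
                 PySem.List.pyRange i (i + (ws0.length : Int)) 1
                   ++ [(i + (ws0.length : Int))] ++ [(i + (ws0.length : Int)) + 1]) := by
            simp [pvAStep, hwl, hieq, show (ws0 ++ [wl]) ∉ cs by simpa using hdup2]
          rw [hstep, if_neg (by simpa using hdup), pvBLoop]
          have e1 : (i + (words.length : Int)) = i + (ws0.length : Int) + 1 := by
            push_cast [hlw]; ring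
          rw [e1, PySem.List.pyRange_one_succ_right (by omega)]
          simp [hws, List.append_assoc]
      | cons s rest2 =>
        have hps : p s = false := pv_dropWhile_head p (w :: rest) s rest2 (by rw [← hrem', hrm])
        have hsB : pvIsSepB s = true := by simpa [hp] using hps
        have hss : pvIsSepA s = true := by rwa [pv_sepAB] at hsB
        have hrl : rem'.length = rest2.length + 1 := by rw [hrm]; simp
        have hnlen : n = i + (words.length : Int) + 1 + rest2.length := by
          rw [hn]; rw [hrl] at hlen; simp only [List.length_cons]; push_cast; omega
        have henum : PySem.List.enumerate (w :: rest) i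
            = PySem.List.enumerate words i ++ PySem.List.enumerate rem' (i + words.length) := by
          conv_lhs => rw [← hsplit]
          exact PySem.List.enumerate_append words rem' i
        rw [henum, hrm, List.foldl_append]
        rw [pv_run n words i cs ci [] [] hwordsep (by omega)]
        simp only [List.nil_append]
        rw [PySem.List.enumerate_cons, List.foldl_cons]
        rw [pvBLoop]
        simp only [hwB, Bool.false_eq_true, if_false]
        rw [← hp, ← hwords, ← hrem', hrm, hseen words]
        by_cases hdup : cs.contains words = true
        · have hstep : pvAStep n (cs, ci, words, PySem.List.pyRange i (i + (words.length : Int)) 1)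
              ((i + (words.length : Int)), s) = (cs, ci, [], []) := by
            simp [pvAStep, hss, hwne, show words ∈ cs by simpa using hdup]
          rw [hstep, pv_main n rest2 (i + (words.length : Int) + 1) seen cs ci
              (by push_cast at hnlen ⊢; omega) hseen]
          rw [if_pos hdup, pvBLoop]
          simp only [hsB, if_true]
        · simp only [Bool.not_eq_true] at hdup
          have hstep : pvAStep n (cs, ci, words, PySem.List.pyRange i (i + (words.length : Int)) 1)
              ((i + (words.length : Int)), s)
              = (cs ++ [words],
                 ci ++ [PySem.List.pyRange i (i + (words.length : Int)) 1
                        ++ [(i + (words.length : Int))]], [], []) := by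
            simp [pvAStep, hss, hwne, show words ∉ cs by simpa using hdup]
          have hxmem : words ∉ seen := by
            have h1 := hseen words; rw [hdup] at h1; simpa using h1
          have hseen' : ∀ t, PySem.Set.contains (PySem.Set.add seen words) t
              = (cs ++ [words]).contains t := by
            intro t
            have h1 : PySem.Set.add seen words = seen ++ [words] := by
              simp [PySem.Set.add, hxmem]
            rw [h1]
            show List.contains (seen ++ [words]) t = List.contains (cs ++ [words]) t
            simp only [List.contains_append]
            rw [show List.contains seen t = cs.contains t from hseen t]
          rw [hstep, pv_main n rest2 (i + (words.length : Int) + 1)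
              (PySem.Set.add seen words) (cs ++ [words])
              (ci ++ [PySem.List.pyRange i (i + (words.length : Int)) 1
                      ++ [(i + (words.length : Int))]])
              (by push_cast at hnlen ⊢; omega) hseen']
          rw [if_neg (by simpa using hdup), pvBLoop]
          simp only [hsB, if_true]
  termination_by rem.length
  decreasing_by
    · simp
    · have h2 := hlen; rw [hrl] at h2; simp only [List.length_cons]; omega
    · have h2 := hlen; rw [hrl] at h2; simp only [List.length_cons]; omega

-- ===== VERDICT (by name: the statement is the Claim_ definition above) =====
theorem process_raw_text_to_sequence_py_spec : Claim_equal_process_raw_text_to_sequence_py := by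
  intro xs _hdom
  unfold Spec_process_raw_text_to_sequence_py
  unfold process_raw_text_to_sequence_py process_raw_text_to_sequence_py_alt
  exact pv_main (PySem.List.len xs) xs 0 PySem.Set.empty [] []
    (by simp [PySem.List.len_eq]) (fun t => rfl)
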